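-- pv_equiv track=rewrite | github.com/Mikelkulla/n8n_scraping_backend | config/utils.py | is_example_domain
-- ===== SOURCE A (Python) =====
-- def is_example_domain(email):
--     """Checks if an email address belongs to a common example domain.
--
--     This function is used to filter out email addresses that use placeholder or
--     test domains (e.g., 'example.com', 'test.com').
--
--     Args:
--         email (str): The email address to check.
--
--     Returns:
--         bool: True if the email's domain is an example domain, False otherwise.
--     """
--     EXAMPLE_DOMAINS = {"example.me","example.com", "example.org", "example.net", "test.com", "sample.com"}
--     email = email.lower()
--     domain = email.split('@')[-1]
--     for example_domain in EXAMPLE_DOMAINS: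
--         if domain == example_domain or domain.endswith('.' + example_domain):
--             return True
--     return False
-- ===== SOURCE B (Python) =====
-- def is_example_domain(email):
--     """Checks if an email address belongs to a common example domain.
--
--     Walks the domain string character by character, keeping a flag that
--     says whether the current position is a dot boundary (start of the
--     domain or just after a '.'), and tests set membership of the current
--     suffix only at boundaries.
--     """
--     EXAMPLE_DOMAINS = {"example.me", "example.com", "example.org",
--                        "example.net", "test.com", "sample.com"}
--     suffix = email.lower().split('@')[-1]
--     boundary = True
--     while True:
--         if boundary and suffix in EXAMPLE_DOMAINS:
--             return True
--         if not suffix: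
--             return False
--         boundary = suffix[0] == '.'
--         suffix = suffix[1:]
-- ===== Notes on version B (the rewrite author's own statement) =====
-- stated objective: alternative
-- what changed: Instead of scanning the known example domains and testing each with == / endswith, B walks the domain string one character at a time with a dot-boundary flag and looks the current suffix up in the set only at boundaries.
import Mathlib
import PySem

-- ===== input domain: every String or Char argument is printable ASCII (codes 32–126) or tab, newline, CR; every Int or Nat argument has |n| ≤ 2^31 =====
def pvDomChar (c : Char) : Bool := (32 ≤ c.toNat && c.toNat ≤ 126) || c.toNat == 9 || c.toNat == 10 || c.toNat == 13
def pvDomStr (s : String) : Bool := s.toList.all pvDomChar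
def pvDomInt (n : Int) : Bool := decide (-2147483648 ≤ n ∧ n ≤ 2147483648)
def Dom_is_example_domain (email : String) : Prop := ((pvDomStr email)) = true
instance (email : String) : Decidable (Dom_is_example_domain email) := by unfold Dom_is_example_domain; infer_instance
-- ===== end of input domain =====

-- B walks the domain string character by character with a dot-boundary flag, testing the
-- current suffix against the set only at boundaries, instead of A's scan over the known
-- domains with == / endswith (objective: alternative).

-- ===== PORT A =====
-- the EXAMPLE_DOMAINS set literal (the loop is an existence test, so iteration order cannot affect A's result)
def pvExampleDomainsA : List (List Char) :=
  ["example.me".toList, "example.com".toList, "example.org".toList,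
   "example.net".toList, "test.com".toList, "sample.com".toList]

-- A's for-loop with its early return
def pvLoopA (domain : List Char) : List (List Char) → Bool
  | [] => false
  | d :: rest =>
      if domain = d ∨ PySem.Chars.endswith domain ('.' :: d) then true
      else pvLoopA domain rest

def is_example_domain (email : String) : Bool :=
  let emailL := PySem.Chars.lower email.toList
  let domain := PySem.List.pyGetD (PySem.Chars.splitOn emailL ['@']) (-1) []
  pvLoopA domain pvExampleDomainsA

-- ===== PORT B =====
def pvExampleDomainsB : List (List Char) :=
  ["example.me".toList, "example.com".toList, "example.org".toList,
   "example.net".toList, "test.com".toList, "sample.com".toList]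

-- B's while-loop over (suffix, boundary): membership is tested only at a dot boundary,
-- then one character is consumed and the flag records whether it was a '.'
def pvWalkB : List Char → Bool → Bool
  | [], boundary =>
      if boundary && pvExampleDomainsB.contains [] then true else false
  | c :: cs, boundary =>
      if boundary && pvExampleDomainsB.contains (c :: cs) then true
      else pvWalkB cs (c == '.')

def is_example_domain_alt (email : String) : Bool :=
  let suffix := PySem.List.pyGetD (PySem.Chars.splitOn (PySem.Chars.lower email.toList) ['@']) (-1) []
  pvWalkB suffix true

-- ===== PRECONDITION & SPEC =====
def Spec_is_example_domain (email : String) (out : Bool) : Prop := out = is_example_domain_alt email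
instance (email : String) (out : Bool) : Decidable (Spec_is_example_domain email out) := by unfold Spec_is_example_domain; infer_instance

-- ===== CLAIM (what is proved, stated in full; the proofs are below) =====
def Claim_equal_is_example_domain : Prop := ∀ (email : String), Dom_is_example_domain email → Spec_is_example_domain email (is_example_domain email)

-- ===== LEMMAS AND PROOFS =====

-- a list ends with '.'::d exactly when some position holds '.' and the rest after it is d
theorem dot_suffix_iff (d l : List Char) :
    ('.' :: d) <:+ l ↔ ∃ (k : Nat) (h : k < l.length), l[k] = '.' ∧ l.drop (k + 1) = d := by
  constructor
  · rintro ⟨t, ht⟩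
    have hlen : t.length < l.length := by rw [← ht]; simp
    have hd : l.drop t.length = '.' :: d := by rw [← ht, List.drop_left]
    refine ⟨t.length, hlen, ?_, ?_⟩
    · have h0 : (l.drop t.length)[0]'(by rw [hd]; simp) = '.' := by simp [hd]
      rw [List.getElem_drop] at h0
      simpa using h0
    · have h1 : l.drop (t.length + 1) = (l.drop t.length).drop 1 := by
        rw [List.drop_drop, Nat.add_comm]
      rw [h1, hd]
      rfl
  · rintro ⟨k, h, hc, hd⟩
    refine ⟨l.take k, ?_⟩
    conv_rhs => rw [← List.take_append_drop k l]
    rw [List.drop_eq_getElem_cons h, hc, hd]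

-- A's loop is an existence test over the domain list
theorem pvLoopA_eq_true (domain : List Char) (L : List (List Char)) :
    pvLoopA domain L = true ↔ ∃ d ∈ L, domain = d ∨ ('.' :: d) <:+ domain := by
  induction L with
  | nil => simp [pvLoopA]
  | cons d rest ih =>
      simp only [pvLoopA, PySem.Chars.endswith_iff]
      split_ifs with h
      · simp only [List.mem_cons]
        exact iff_of_true trivial ⟨d, Or.inl rfl, h⟩
      · simp only [List.mem_cons, exists_eq_or_imp, ih]
        exact (or_iff_right h).symm

-- B's walk finds exactly: the whole suffix (if the flag is set) or a dot-boundary suffix in the set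
theorem pvWalkB_eq_true (l : List Char) (b : Bool) :
    pvWalkB l b = true ↔
      (b = true ∧ l ∈ pvExampleDomainsB) ∨
        ∃ (k : Nat) (h : k < l.length), l[k] = '.' ∧ l.drop (k + 1) ∈ pvExampleDomainsB := by
  induction l generalizing b with
  | nil =>
      simp [pvWalkB]
  | cons c cs ih =>
      simp only [pvWalkB]
      split_ifs with h
      · rw [Bool.and_eq_true, List.contains_eq_mem, decide_eq_true_iff] at h
        exact iff_of_true rfl (Or.inl h)
      · rw [ih]
        have hne : ¬ (b = true ∧ (c :: cs) ∈ pvExampleDomainsB) := by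
          intro ⟨hb, hm⟩
          exact h (by rw [Bool.and_eq_true, List.contains_eq_mem, decide_eq_true_iff]; exact ⟨hb, hm⟩)
        constructor
        · rintro (⟨hb, hm⟩ | ⟨k, hk, hc, hmem⟩)
          · refine Or.inr ⟨0, by simp, ?_, by simpa using hm⟩
            simpa using (beq_iff_eq.mp hb)
          · exact Or.inr ⟨k + 1, by simpa using hk, by simpa using hc, by simpa using hmem⟩
        · rintro (hb | ⟨k, hk, hc, hmem⟩)
          · exact absurd hb hne
          · cases k with
            | zero =>
                refine Or.inl ⟨beq_iff_eq.mpr (by simpa using hc), by simpa using hmem⟩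
            | succ j =>
                exact Or.inr ⟨j, by simpa using hk, by simpa using hc, by simpa using hmem⟩

-- the two programs agree for every domain string
theorem core_eq (domain : List Char) :
    pvLoopA domain pvExampleDomainsA = pvWalkB domain true := by
  rw [Bool.eq_iff_iff, pvLoopA_eq_true, pvWalkB_eq_true]
  have hAB : pvExampleDomainsA = pvExampleDomainsB := rfl
  rw [hAB]
  constructor
  · rintro ⟨d, hd, rfl | hsuf⟩
    · exact Or.inl ⟨rfl, hd⟩
    · obtain ⟨k, h, hc, hdrop⟩ := (dot_suffix_iff d domain).mp hsuf
      exact Or.inr ⟨k, h, hc, hdrop ▸ hd⟩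
  · rintro (⟨_, hd⟩ | ⟨k, h, hc, hdm⟩)
    · exact ⟨domain, hd, Or.inl rfl⟩
    · exact ⟨domain.drop (k + 1), hdm, Or.inr ((dot_suffix_iff _ _).mpr ⟨k, h, hc, rfl⟩)⟩

-- ===== VERDICT (by name: the statement is the Claim_ definition above) =====
theorem is_example_domain_spec : Claim_equal_is_example_domain := by
  intro email _
  unfold Spec_is_example_domain is_example_domain is_example_domain_alt
  exact core_eq _
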